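-- pv_equiv track=rewrite | github.com/sammcj/agentic-coding | Skills/extract-wisdom/scripts/wisdom.py | _split_yaml_flow_list
-- ===== SOURCE A (Python) =====
-- def _split_yaml_flow_list(inner: str) -> list[str]:
--     """Split a flow-style YAML list body, respecting quoted commas."""
--     items: list[str] = []
--     buf: list[str] = []
--     quote: str | None = None
--     for ch in inner:
--         if quote is not None:
--             buf.append(ch)
--             if ch == quote:
--                 quote = None
--         elif ch in ('"', "'"):
--             buf.append(ch)
--             quote = ch
--         elif ch == ",":
--             items.append("".join(buf))
--             buf = []
--         else:
--             buf.append(ch)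
--     if buf:
--         items.append("".join(buf))
--     return items
-- ===== SOURCE B (Python) =====
-- def _split_yaml_flow_list(inner: str) -> list[str]:
--     """Split a flow-style YAML list body, respecting quoted commas."""
--
--     def first_comma(s: str) -> int:
--         """Index of the first top-level (unquoted) comma in s, or -1."""
--         quote = None
--         for i, ch in enumerate(s):
--             if quote is not None:
--                 if ch == quote:
--                     quote = None
--             elif ch in ('"', "'"):
--                 quote = ch
--             elif ch == ",":
--                 return i
--         return -1
--
--     items: list[str] = []
--     rest = inner
--     while True:
--         i = first_comma(rest)
--         if i < 0:
--             if rest: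
--                 items.append(rest)
--             return items
--         items.append(rest[:i])
--         rest = rest[i + 1:]
-- ===== Notes on version B (the rewrite author's own statement) =====
-- stated objective: alternative
-- what changed: A builds each item with a per-segment character buffer inside one accumulator loop; B instead repeatedly finds the index of the first unquoted comma with a helper and slices the string there, recursing on the remainder (no item buffer at all).
import Mathlib
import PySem

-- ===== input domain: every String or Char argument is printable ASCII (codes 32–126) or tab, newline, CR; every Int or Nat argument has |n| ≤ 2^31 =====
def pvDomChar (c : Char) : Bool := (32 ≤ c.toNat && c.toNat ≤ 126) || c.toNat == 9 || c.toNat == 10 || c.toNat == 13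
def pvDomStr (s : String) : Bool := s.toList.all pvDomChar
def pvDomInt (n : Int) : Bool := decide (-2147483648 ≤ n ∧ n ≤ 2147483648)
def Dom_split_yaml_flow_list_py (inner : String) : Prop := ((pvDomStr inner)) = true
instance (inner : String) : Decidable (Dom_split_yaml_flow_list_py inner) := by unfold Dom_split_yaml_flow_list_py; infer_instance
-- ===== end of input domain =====

-- B replaces A's single accumulator pass (items/buf/quote state) by repeated
-- splitting at the first top-level comma (find-index helper + slicing); objective: alternative decomposition.

-- ===== PORT A =====
-- the for-loop of A: state = (items, buf, quote); final 'if buf: append' at the end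
def pvALoop (cs : List Char) (items : List String) (buf : List Char) (quote : Option Char) : List String :=
  match cs with
  | [] => if buf ≠ [] then items ++ [String.ofList buf] else items
  | ch :: rest =>
    match quote with
    | some q => pvALoop rest items (buf ++ [ch]) (if ch == q then none else some q)
    | none =>
      if ch == '"' || ch == '\'' then pvALoop rest items (buf ++ [ch]) (some ch)
      else if ch == ',' then pvALoop rest (items ++ [String.ofList buf]) [] none
      else pvALoop rest items (buf ++ [ch]) none

def split_yaml_flow_list_py (inner : String) : List String :=
  pvALoop inner.toList [] [] none

-- ===== PORT B =====
-- Source B's first_comma: enumerate with index i, quote tracking, early return i; -1 becomes none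
def pvFirstComma (cs : List Char) (i : Nat) (quote : Option Char) : Option Nat :=
  match cs with
  | [] => none
  | ch :: rest =>
    match quote with
    | some q => pvFirstComma rest (i + 1) (if ch == q then none else some q)
    | none =>
      if ch == '"' || ch == '\'' then pvFirstComma rest (i + 1) (some ch)
      else if ch == ',' then some i
      else pvFirstComma rest (i + 1) none

-- a returned index is a real position in the scanned string (needed for termination)
theorem pvFirstComma_lt (cs : List Char) (k : Nat) (q : Option Char) (i : Nat)
    (h : pvFirstComma cs k q = some i) : i < k + cs.length := by
  induction cs generalizing k q with
  | nil => simp [pvFirstComma] at h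
  | cons c cs ih =>
    cases q with
    | some qc =>
      simp only [pvFirstComma] at h
      have := ih _ _ h; simp; omega
    | none =>
      simp only [pvFirstComma] at h
      split at h
      · have := ih _ _ h; simp; omega
      · split at h
        · simp at h; simp; omega
        · have := ih _ _ h; simp; omega

-- Source B's while-loop: split off rest[:i], continue on rest[i+1:]
def pvBLoop (l : List Char) : List String :=
  match h : pvFirstComma l 0 none with
  | none => if l = [] then [] else [String.ofList l]
  | some i => String.ofList (l.take i) :: pvBLoop (l.drop (i + 1))
termination_by l.length
decreasing_by
  have := pvFirstComma_lt l 0 none i h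
  simp at this ⊢; omega

def split_yaml_flow_list_py_alt (inner : String) : List String :=
  pvBLoop inner.toList

-- ===== PRECONDITION & SPEC =====
def Spec_split_yaml_flow_list_py (inner : String) (out : List String) : Prop := out = split_yaml_flow_list_py_alt inner
instance (inner : String) (out : List String) : Decidable (Spec_split_yaml_flow_list_py inner out) := by unfold Spec_split_yaml_flow_list_py; infer_instance

-- ===== CLAIM (what is proved, stated in full; the proofs are below) =====
def Claim_equal_split_yaml_flow_list_py : Prop := ∀ (inner : String), Dom_split_yaml_flow_list_py inner → Spec_split_yaml_flow_list_py inner (split_yaml_flow_list_py inner)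

-- ===== LEMMAS AND PROOFS =====

-- index-shift: the enumerate counter is a pure offset
theorem pvFirstComma_shift (cs : List Char) (i : Nat) (q : Option Char) :
    pvFirstComma cs i q = (pvFirstComma cs 0 q).map (· + i) := by
  induction cs generalizing i q with
  | nil => simp [pvFirstComma]
  | cons c cs ih =>
    cases q with
    | some qc =>
      simp only [pvFirstComma]
      rw [ih, ih 1]
      cases pvFirstComma cs 0 (if c == qc then none else some qc) <;> simp <;> omega
    | none =>
      simp only [pvFirstComma]
      split
      · rw [ih, ih 1]; cases pvFirstComma cs 0 (some c) <;> simp <;> omega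
      · split
        · simp
        · rw [ih, ih 1]; cases pvFirstComma cs 0 none <;> simp <;> omega

-- A's loop, characterised through B's first-comma search
theorem pvALoop_char (cs : List Char) (items : List String) (buf : List Char) (q : Option Char) :
    pvALoop cs items buf q =
      match pvFirstComma cs 0 q with
      | none => if buf ++ cs ≠ [] then items ++ [String.ofList (buf ++ cs)] else items
      | some i => pvALoop (cs.drop (i + 1)) (items ++ [String.ofList (buf ++ cs.take i)]) [] none := by
  induction cs generalizing items buf q with
  | nil => simp [pvALoop, pvFirstComma]
  | cons c cs ih =>
    cases q with
    | some qc =>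
      simp only [pvALoop, pvFirstComma]
      rw [ih, pvFirstComma_shift cs 1]
      cases h : pvFirstComma cs 0 (if c == qc then none else some qc) with
      | none => simp
      | some j => simp [List.take_succ_cons, List.drop_succ_cons]
    | none =>
      simp only [pvALoop, pvFirstComma]
      split
      · rw [ih, pvFirstComma_shift cs 1]
        cases h : pvFirstComma cs 0 (some c) with
        | none => simp
        | some j => simp [List.take_succ_cons, List.drop_succ_cons]
      · split
        · simp
        · rw [ih, pvFirstComma_shift cs 1]
          cases h : pvFirstComma cs 0 none with
          | none => simp
          | some j => simp [List.take_succ_cons, List.drop_succ_cons]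

theorem pvBLoop_none (l : List Char) (h : pvFirstComma l 0 none = none) :
    pvBLoop l = if l = [] then [] else [String.ofList l] := by
  conv_lhs => rw [pvBLoop.eq_def]
  split
  · rfl
  · simp_all

theorem pvBLoop_some (l : List Char) (i : Nat) (h : pvFirstComma l 0 none = some i) :
    pvBLoop l = String.ofList (l.take i) :: pvBLoop (l.drop (i + 1)) := by
  conv_lhs => rw [pvBLoop.eq_def]
  split
  · simp_all
  · rename_i j hj
    rw [h] at hj
    injection hj with hji
    subst hji
    rfl

theorem pvALoop_eq_bLoop (n : Nat) (cs : List Char) (h : cs.length ≤ n) (items : List String) :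
    pvALoop cs items [] none = items ++ pvBLoop cs := by
  induction n generalizing cs items with
  | zero =>
    have hc : cs = [] := List.eq_nil_of_length_eq_zero (Nat.le_zero.mp h)
    subst hc; simp [pvALoop, pvBLoop_none [] rfl]
  | succ n ih =>
    rw [pvALoop_char]
    cases hf : pvFirstComma cs 0 none with
    | none =>
      rw [pvBLoop_none cs hf]
      by_cases hc : cs = [] <;> simp [hc]
    | some i =>
      have hi := pvFirstComma_lt cs 0 none i hf
      simp only [List.nil_append]
      rw [ih (cs.drop (i + 1)) (by simp at h ⊢; omega)]
      rw [pvBLoop_some cs i hf]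
      simp

-- ===== VERDICT (by name: the statement is the Claim_ definition above) =====
theorem split_yaml_flow_list_py_spec : Claim_equal_split_yaml_flow_list_py := by
  intro inner _
  unfold Spec_split_yaml_flow_list_py split_yaml_flow_list_py split_yaml_flow_list_py_alt
  rw [pvALoop_eq_bLoop inner.toList.length _ le_rfl]
  simp
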